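-- pv_equiv track=rewrite | github.com/NecZhang/matlab2cpp-agentic-service | src/matlab2cpp_agentic_service/core/agents/streamlined/project_manager.py | _extract_header_signatures
-- ===== SOURCE A (Python) =====
-- from typing import Dict, Any, List, Optional, Set, Tuple, Callable
--
-- def _extract_header_signatures(content: str) -> List[str]:
--     """Extract function signatures from a header file."""
--     signatures: List[str] = []
--     if not content:
--         return signatures
--
--     lines = content.split('\n')
--     buffered = ""
--     for line in lines:
--         stripped = line.strip()
--         if not stripped or stripped.startswith('//'):
--             continue
--         buffered += " " + stripped
--         if ';' in stripped:
--             signatures.append(buffered.strip())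
--             buffered = ""
--     return signatures
-- ===== SOURCE B (Python) =====
-- from typing import List
--
-- def _extract_header_signatures(content: str) -> List[str]:
--     """Extract function signatures from a header file."""
--     if not content:
--         return []
--     cleaned = [s for s in (line.strip() for line in content.split('\n'))
--                if s and not s.startswith('//')]
--     boundaries = [i for i, s in enumerate(cleaned) if ';' in s]
--     signatures: List[str] = []
--     prev = 0
--     for b in boundaries:
--         signatures.append(' '.join(cleaned[prev:b + 1]))
--         prev = b + 1
--     return signatures
-- ===== Notes on version B (the rewrite author's own statement) =====
-- stated objective: alternative
-- what changed: Replaces A's single pass with an inline string buffer flushed on ';' by a three-stage pipeline: filter/strip the lines, compute the list of semicolon boundary indices, then emit one ' '.join of each cleaned-line slice between consecutive boundaries.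
import Mathlib
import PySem

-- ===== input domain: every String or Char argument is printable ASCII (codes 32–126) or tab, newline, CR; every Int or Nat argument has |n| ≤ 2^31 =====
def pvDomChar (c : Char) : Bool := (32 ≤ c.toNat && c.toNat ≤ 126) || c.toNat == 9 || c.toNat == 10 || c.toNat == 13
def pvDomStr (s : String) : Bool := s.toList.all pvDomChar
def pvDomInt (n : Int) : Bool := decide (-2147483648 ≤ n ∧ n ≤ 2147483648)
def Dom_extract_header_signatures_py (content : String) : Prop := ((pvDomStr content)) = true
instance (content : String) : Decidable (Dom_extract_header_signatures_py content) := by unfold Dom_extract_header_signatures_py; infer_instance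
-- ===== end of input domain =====

-- B restructures A's flush-on-';' buffer loop as a three-stage pipeline (clean lines, boundary indices, slice-and-join); alternative decomposition, same cost.


-- ===== PORT A =====
def extract_header_signatures_py (content : String) : List String :=
  if content.toList = [] then []
  else
    let lines := PySem.Chars.splitOn content.toList ['\n']
    (lines.foldl (fun (st : List String × List Char) line =>
      let stripped := PySem.Chars.strip line
      if stripped.isEmpty || PySem.Chars.startswith stripped ['/', '/'] then st
      else
        let buffered := st.2 ++ ' ' :: stripped
        if PySem.Chars.isIn [';'] stripped then
          (st.1 ++ [String.ofList (PySem.Chars.strip buffered)], [])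
        else (st.1, buffered)) ([], [])).1

-- ===== PORT B =====
def pvKeep (s : List Char) : Bool := !s.isEmpty && !PySem.Chars.startswith s ['/', '/']

def extract_header_signatures_py_alt (content : String) : List String :=
  if content.toList = [] then []
  else
    let cleaned := ((PySem.Chars.splitOn content.toList ['\n']).map PySem.Chars.strip).filter pvKeep
    let boundaries := ((PySem.List.enumerate cleaned).filter
        (fun p => PySem.Chars.isIn [';'] p.2)).map Prod.fst
    (boundaries.foldl (fun (st : List String × Int) b =>
      (st.1 ++ [String.ofList (PySem.Chars.join [' ']
          (PySem.List.slice cleaned (some st.2) (some (b + 1))))], b + 1)) ([], 0)).1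

-- ===== PRECONDITION & SPEC =====
def Spec_extract_header_signatures_py (content : String) (out : List String) : Prop := out = extract_header_signatures_py_alt content
instance (content : String) (out : List String) : Decidable (Spec_extract_header_signatures_py content out) := by unfold Spec_extract_header_signatures_py; infer_instance

-- ===== CLAIM (what is proved, stated in full; the proofs are below) =====
def Claim_equal_extract_header_signatures_py : Prop := ∀ (content : String), Dom_extract_header_signatures_py content → Spec_extract_header_signatures_py content (extract_header_signatures_py content)

-- ===== LEMMAS AND PROOFS =====

-- a "good" chunk: nonempty, no leading and no trailing whitespace
def pvGood (s : List Char) : Prop :=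
  s ≠ [] ∧ (∀ c t, s = c :: t → PySem.Chars.isspace c = false) ∧
    (∀ c t, s.reverse = c :: t → PySem.Chars.isspace c = false)

-- A's per-cleaned-chunk step
def pvStepC (st : List String × List Char) (s : List Char) : List String × List Char :=
  if PySem.Chars.isIn [';'] s then
    (st.1 ++ [String.ofList (PySem.Chars.strip (st.2 ++ ' ' :: s))], [])
  else (st.1, st.2 ++ ' ' :: s)

-- the recursive specification both ports are reduced to
def pvSigsB (pend : List (List Char)) : List (List Char) → List String
  | [] => []
  | s :: rest =>
      if PySem.Chars.isIn [';'] s then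
        String.ofList (PySem.Chars.join [' '] (pend ++ [s])) :: pvSigsB [] rest
      else pvSigsB (pend ++ [s]) rest

theorem pvDropWhile_head {p : Char → Bool} {l : List Char} {c : Char} {t : List Char}
    (h : List.dropWhile p l = c :: t) : p c = false := by
  induction l with
  | nil => simp at h
  | cons a l ih =>
    rw [List.dropWhile_cons] at h
    by_cases hp : p a = true
    · simp [hp] at h; exact ih h
    · simp [hp] at h; rw [← h.1]; exact Bool.eq_false_iff.2 hp

theorem pvLstrip_cons_space (x : List Char) :
    PySem.Chars.lstrip (' ' :: x) = PySem.Chars.lstrip x := by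
  have h : PySem.Chars.isspace ' ' = true := by decide
  simp [PySem.Chars.lstrip, List.dropWhile_cons, h]

theorem pvLstrip_of_good {s : List Char} (hs : pvGood s) (y : List Char) :
    PySem.Chars.lstrip (s ++ y) = s ++ y := by
  obtain ⟨hne, hhd, -⟩ := hs
  cases s with
  | nil => exact absurd rfl hne
  | cons c t =>
    simp [PySem.Chars.lstrip, List.dropWhile_cons, hhd c t rfl]

theorem pvRstrip_of_good_last {x b : List Char} (hb : pvGood b) :
    PySem.Chars.rstrip (x ++ b) = x ++ b := by
  obtain ⟨hne, -, hlast⟩ := hb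
  have hrev : b.reverse ≠ [] := by simpa using hne
  cases hb' : b.reverse with
  | nil => exact absurd hb' hrev
  | cons c t =>
    have hc : PySem.Chars.isspace c = false := hlast c t hb'
    have hbeq : b = t.reverse ++ [c] := by
      have := congrArg List.reverse hb'
      simpa using this
    simp only [PySem.Chars.rstrip, List.reverse_append, hb']
    rw [show (c :: t) ++ x.reverse = c :: (t ++ x.reverse) by simp, List.dropWhile_cons]
    simp [hc, hbeq]

-- join with a single-space separator, written as a flatten
theorem pvJoin_cons (a : List Char) (rest : List (List Char)) :
    PySem.Chars.join [' '] (a :: rest) = a ++ (rest.map (' ' :: ·)).flatten := by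
  induction rest generalizing a with
  | nil => simp [PySem.Chars.join, List.intercalate]
  | cons b rest ih =>
    have h := ih b
    simp only [PySem.Chars.join] at h ⊢
    rw [show [' '].intercalate (a :: b :: rest) = a ++ [' '] ++ [' '].intercalate (b :: rest) by
          simp [List.intercalate],
        h]
    simp

theorem pvStrip_chunks (p : List (List Char)) (hne : p ≠ [])
    (hg : ∀ s ∈ p, pvGood s) :
    PySem.Chars.strip ((p.map (' ' :: ·)).flatten) = PySem.Chars.join [' '] p := by
  cases p with
  | nil => exact absurd rfl hne
  | cons a rest =>
    have hga : pvGood a := hg a (by simp)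
    rw [pvJoin_cons]
    have h1 : PySem.Chars.strip (((a :: rest).map (' ' :: ·)).flatten)
        = PySem.Chars.rstrip (a ++ (rest.map (' ' :: ·)).flatten) := by
      simp only [List.map_cons, List.flatten_cons]
      show PySem.Chars.rstrip (PySem.Chars.lstrip _) = _
      rw [show (' ' :: a) ++ (rest.map (' ' :: ·)).flatten
            = ' ' :: (a ++ (rest.map (' ' :: ·)).flatten) by simp,
          pvLstrip_cons_space, pvLstrip_of_good hga]
    rw [h1]
    -- rstrip leaves the string alone: its last chunk ends in a non-space
    rcases List.eq_nil_or_concat rest with hr | ⟨q, b, hr⟩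
    · subst hr
      simpa using pvRstrip_of_good_last (x := []) hga
    · subst hr
      have hgb : pvGood b := hg b (by simp)
      have heq : a ++ (((q.concat b).map (' ' :: ·)).flatten)
          = (a ++ ((q.map (' ' :: ·)).flatten) ++ [' ']) ++ b := by
        simp
      rw [heq, pvRstrip_of_good_last hgb]

-- strip of anything nonempty is a good chunk
theorem pvGood_strip {l : List Char} (h : PySem.Chars.strip l ≠ []) :
    pvGood (PySem.Chars.strip l) := by
  refine ⟨h, ?_, ?_⟩
  · intro c t hct
    -- head of strip l = head of lstrip l, which dropWhile guarantees non-space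
    have hsuff : (List.dropWhile PySem.Chars.isspace (PySem.Chars.lstrip l).reverse)
        <:+ (PySem.Chars.lstrip l).reverse := List.dropWhile_suffix _
    obtain ⟨u, hu⟩ := hsuff
    have hl : PySem.Chars.lstrip l
        = (List.dropWhile PySem.Chars.isspace (PySem.Chars.lstrip l).reverse).reverse
          ++ u.reverse := by
      have := congrArg List.reverse hu
      simpa [PySem.Chars.lstrip] using this.symm
    have hstrip : PySem.Chars.strip l
        = (List.dropWhile PySem.Chars.isspace (PySem.Chars.lstrip l).reverse).reverse := rfl
    rw [hstrip] at hct
    have : PySem.Chars.lstrip l = c :: (t ++ u.reverse) := by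
      rw [hl, hct]; simp
    exact pvDropWhile_head (p := PySem.Chars.isspace) (by simpa [PySem.Chars.lstrip] using this)
  · intro c t hct
    have hct' : List.dropWhile PySem.Chars.isspace (PySem.Chars.lstrip l).reverse = c :: t := by
      have : (PySem.Chars.strip l).reverse
          = List.dropWhile PySem.Chars.isspace (PySem.Chars.lstrip l).reverse := by
        simp [PySem.Chars.strip, PySem.Chars.rstrip]
      rw [← this, hct]
    exact pvDropWhile_head hct'

-- A's fold over the cleaned chunks equals pvSigsB
theorem pvA_fold (c : List (List Char)) (sigs : List String) (pend : List (List Char))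
    (hgc : ∀ s ∈ c, pvGood s) (hgp : ∀ s ∈ pend, pvGood s) :
    (c.foldl pvStepC (sigs, (pend.map (' ' :: ·)).flatten)).1 = sigs ++ pvSigsB pend c := by
  induction c generalizing sigs pend with
  | nil => simp [pvSigsB]
  | cons s rest ih =>
    have hgs : pvGood s := hgc s (by simp)
    have hgrest : ∀ x ∈ rest, pvGood x := fun x hx => hgc x (by simp [hx])
    simp only [List.foldl_cons, pvStepC, pvSigsB]
    by_cases hb : PySem.Chars.isIn [';'] s = true
    · simp only [hb, if_true]
      have hflat : (pend.map (' ' :: ·)).flatten ++ ' ' :: s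
          = (((pend ++ [s]).map (' ' :: ·)).flatten) := by simp
      rw [hflat, pvStrip_chunks (pend ++ [s]) (by simp)
            (by intro x hx; rcases List.mem_append.1 hx with h | h
                · exact hgp x h
                · simp at h; subst h; exact hgs)]
      have := ih (sigs ++ [String.ofList (PySem.Chars.join [' '] (pend ++ [s]))]) []
        hgrest (by simp)
      simpa using this
    · simp only [hb, if_false]
      have hflat : (pend.map (' ' :: ·)).flatten ++ ' ' :: s
          = (((pend ++ [s]).map (' ' :: ·)).flatten) := by simp
      rw [hflat]
      exact ih sigs (pend ++ [s]) hgrest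
        (by intro x hx; rcases List.mem_append.1 hx with h | h
            · exact hgp x h
            · simp at h; subst h; exact hgs)

-- B's boundary fold equals pvSigsB
theorem pvB_fold (c0 : List (List Char)) (c : List (List Char)) (k prev : Nat)
    (hpk : prev ≤ k) (hc : c = c0.drop k) (sigs : List String) :
    ((((PySem.List.enumerate c (k : Int)).filter
        (fun p => PySem.Chars.isIn [';'] p.2)).map Prod.fst).foldl
      (fun (st : List String × Int) b =>
        (st.1 ++ [String.ofList (PySem.Chars.join [' ']
            (PySem.List.slice c0 (some st.2) (some (b + 1))))], b + 1))
      (sigs, (prev : Int))).1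
    = sigs ++ pvSigsB ((c0.take k).drop prev) c := by
  induction c generalizing k prev sigs with
  | nil => simp [pvSigsB, PySem.List.enumerate]
  | cons s rest ih =>
    have hk : k < c0.length := by
      by_contra hlt
      have : c0.drop k = [] := List.drop_eq_nil_of_le (by omega)
      rw [← hc] at this; simp at this
    have hrest : rest = c0.drop (k + 1) := by
      have := congrArg (List.drop 1) hc
      simpa [List.drop_drop] using this
    have htake : c0.take (k + 1) = c0.take k ++ [s] := by
      have h1 : c0.take (k + 1) = c0.take k ++ (c0.drop k).take 1 := by
        rw [List.take_add]
      rw [h1, ← hc]; simp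
    have hlen : (c0.take k).length = k := List.length_take_of_le (by omega)
    have hpend : ((c0.take (k + 1)).drop prev) = (c0.take k).drop prev ++ [s] := by
      rw [htake, List.drop_append_of_le_length (by omega)]
    have henum : PySem.List.enumerate (s :: rest) (k : Int)
        = ((k : Int), s) :: PySem.List.enumerate rest ((k : Int) + 1) := by
      simp [PySem.List.enumerate]
    rw [henum]
    have hcast : ((k : Int) + 1) = ((k + 1 : Nat) : Int) := by push_cast; ring
    have hslice : PySem.List.slice c0 (some ((prev : Nat) : Int)) (some (((k + 1 : Nat)) : Int))
        = (c0.take (k + 1)).drop prev := by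
      rw [PySem.List.slice_natCast, ← List.drop_take]
    by_cases hb : PySem.Chars.isIn [';'] s = true
    · rw [List.filter_cons_of_pos (by simpa using hb), List.map_cons, List.foldl_cons]
      have hih := ih (k + 1) (k + 1) (le_refl _) hrest
        (sigs ++ [String.ofList (PySem.Chars.join [' '] ((c0.take k).drop prev ++ [s]))])
      simp only [hcast, hslice, hpend, hih]
      simp [pvSigsB, hb, List.drop_take]
    · rw [List.filter_cons_of_neg (by simpa using hb)]
      have hih := ih (k + 1) prev (by omega) hrest sigs
      rw [hcast, hih]
      simp [pvSigsB, hb, hpend]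

theorem pvCleaned_good (c : List (List Char)) (lines : List (List Char))
    (hc : c = (lines.map PySem.Chars.strip).filter pvKeep) :
    ∀ s ∈ c, pvGood s := by
  intro s hs
  rw [hc] at hs
  obtain ⟨hmem, hkeep⟩ := List.mem_filter.1 hs
  obtain ⟨l, -, hl⟩ := List.mem_map.1 hmem
  have hne : s ≠ [] := by
    intro h
    rw [h] at hkeep
    simp [pvKeep] at hkeep
  subst hl
  exact pvGood_strip hne

-- ===== VERDICT (by name: the statement is the Claim_ definition above) =====
theorem extract_header_signatures_py_spec : Claim_equal_extract_header_signatures_py := by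
  intro content _
  unfold Spec_extract_header_signatures_py extract_header_signatures_py
    extract_header_signatures_py_alt
  by_cases h : content.toList = []
  · simp [h]
  · simp only [h, if_false]
    set lines := PySem.Chars.splitOn content.toList ['\n'] with hlines
    set cleaned := ((lines.map PySem.Chars.strip)).filter pvKeep with hcleaned
    have hgood : ∀ s ∈ cleaned, pvGood s := pvCleaned_good cleaned lines hcleaned
    -- A's fold over lines is the fold of pvStepC over cleaned
    have hA : (lines.foldl (fun (st : List String × List Char) line =>
        let stripped := PySem.Chars.strip line
        if stripped.isEmpty || PySem.Chars.startswith stripped ['/', '/'] then st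
        else
          let buffered := st.2 ++ ' ' :: stripped
          if PySem.Chars.isIn [';'] stripped then
            (st.1 ++ [String.ofList (PySem.Chars.strip buffered)], [])
          else (st.1, buffered)) ([], []))
        = cleaned.foldl pvStepC ([], []) := by
      rw [hcleaned, ← PySem.List.foldl_if_eq_foldl_filter pvKeep pvStepC, List.foldl_map]
      apply PySem.List.foldl_congr_mem
      intro acc x hx
      by_cases hk : pvKeep (PySem.Chars.strip x) = true
      · have hcond : ((PySem.Chars.strip x).isEmpty
            || PySem.Chars.startswith (PySem.Chars.strip x) ['/', '/']) = false := by
          simp only [pvKeep, Bool.and_eq_true, Bool.not_eq_true'] at hk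
          simp [hk.1, hk.2]
        simp [hcond, hk, pvStepC]
      · have hcond : ((PySem.Chars.strip x).isEmpty
            || PySem.Chars.startswith (PySem.Chars.strip x) ['/', '/']) = true := by
          simp only [pvKeep, Bool.and_eq_true, Bool.not_eq_true'] at hk
          cases h1 : (PySem.Chars.strip x).isEmpty with
          | true => simp [h1]
          | false =>
            cases h2 : PySem.Chars.startswith (PySem.Chars.strip x) ['/', '/'] with
            | true => simp [h2]
            | false => exact absurd ⟨h1, h2⟩ hk
        simp [hcond, hk]
    rw [hA]
    have h1 : (cleaned.foldl pvStepC ([], [])).1 = pvSigsB [] cleaned := by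
      have := pvA_fold cleaned [] [] hgood (by simp)
      simpa using this
    have h2 := pvB_fold cleaned cleaned 0 0 (le_refl _) (by simp) []
    simp only [Nat.cast_zero] at h2
    rw [h1]
    rw [h2]
    simp
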